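-- pv_equiv track=rewrite | github.com/okmd/leetcode | dp/lb-26-max-length-of-pair-chain-lc-646.py | max_chain_len
-- ===== SOURCE A (Python) =====
-- def max_chain_len(arr):
--     # sort the array based on right value
--     n = len(arr)
--     arr.sort(key=lambda x:x[1])
--     dp = [1]*n # represents the longest increasing subsequence till ith index.
--     # initally each element is in lis iteself hence 1 for each element.
--     i= 1
--     while i<n:
--         j=0
--         while j<i:
--             if arr[i][0] > arr[j][1]:
--                 # this element is included  in chain and previous till j we have already calculated the chain length
--                 # so new chain length till i is dp[i]
--                 dp[i] = max(dp[i], 1 + dp[j])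
--             j += 1
--         i+=1
--     return max(dp)# max element will be the chain length for complete array
-- ===== SOURCE B (Python) =====
-- def max_chain_len(arr):
--     # Greedy interval scheduling: sort by right endpoint (in place, like A),
--     # then take every pair whose start exceeds the last taken end.
--     arr.sort(key=lambda x: x[1])
--     count = 0
--     last = None
--     for s, e in arr:
--         if last is None or s > last:
--             count += 1
--             last = e
--     return count
-- ===== Notes on version B (the rewrite author's own statement) =====
-- stated objective: faster
-- what changed: Replaces the O(n^2) LIS-style DP over all earlier indices with greedy interval scheduling after the same sort-by-end: one linear scan counting pairs whose start exceeds the last chosen end.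
import Mathlib
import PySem

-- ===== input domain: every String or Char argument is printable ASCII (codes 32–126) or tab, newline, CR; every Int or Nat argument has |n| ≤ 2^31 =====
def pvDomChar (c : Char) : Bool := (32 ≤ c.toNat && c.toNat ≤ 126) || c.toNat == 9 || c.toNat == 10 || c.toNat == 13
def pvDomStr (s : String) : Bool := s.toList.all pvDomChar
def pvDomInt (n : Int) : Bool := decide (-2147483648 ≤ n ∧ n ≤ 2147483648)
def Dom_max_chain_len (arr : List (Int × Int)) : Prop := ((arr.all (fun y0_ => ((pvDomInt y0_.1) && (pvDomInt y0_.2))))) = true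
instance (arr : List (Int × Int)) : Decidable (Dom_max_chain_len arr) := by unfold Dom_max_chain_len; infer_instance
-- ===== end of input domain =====

-- B replaces A's O(n^2) DP after the sort with a greedy linear scan (same sort by right endpoint).
-- Both Pythons sort `arr` in place; the equivalence proved here is about the RETURN value.

-- ===== PORT A =====
def max_chain_len (arr : List (Int × Int)) : Int :=
  let n : Int := arr.length                                  -- n = len(arr)
  let a := PySem.List.sorted arr (fun p => p.2)              -- arr.sort(key=lambda x: x[1])
  let dp0 : List Int := List.replicate arr.length 1          -- dp = [1]*n
  let dp := (PySem.List.pyRange 1 n 1).foldl (fun dp i =>    -- while i < n  (i = 1,2,…)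
    (PySem.List.pyRange 0 i 1).foldl (fun dp j =>            -- while j < i  (j = 0,1,…)
      -- indices i, j are always in range; pyGetD/pySetD defaults are never used
      if (PySem.List.pyGetD a i ((0:Int),(0:Int))).1 > (PySem.List.pyGetD a j ((0:Int),(0:Int))).2
      then PySem.List.pySetD dp i (max (PySem.List.pyGetD dp i 0) (1 + PySem.List.pyGetD dp j 0))
      else dp) dp) dp0
  match PySem.List.max? dp (fun x => x) with                 -- return max(dp); ValueError on empty → Pre_
  | some v => v
  | none => 0

-- ===== PORT B =====
def max_chain_len_alt (arr : List (Int × Int)) : Int :=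
  let a := PySem.List.sorted arr (fun p => p.2)              -- arr.sort(key=lambda x: x[1])
  (a.foldl (fun (st : Int × Option Int) p =>                 -- for s, e in arr:
      match st.2 with                                        --   if last is None or s > last:
      | none => (st.1 + 1, some p.2)                         --     count += 1; last = e
      | some l => if l < p.1 then (st.1 + 1, some p.2) else st)
    ((0:Int), (none : Option Int))).1                        -- return count

-- ===== PRECONDITION & SPEC =====
-- Pre_ excludes only the empty list, on which A raises ValueError (max of an empty sequence); B returns 0 there.
def Pre_max_chain_len (arr : List (Int × Int)) : Prop := arr ≠ []
instance (arr : List (Int × Int)) : Decidable (Pre_max_chain_len arr) := by unfold Pre_max_chain_len; infer_instance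
def pvWitness_max_chain_len : (List (Int × Int)) := [(1, 2), (3, 4)]

def Spec_max_chain_len (arr : List (Int × Int)) (out : Int) : Prop := out = max_chain_len_alt arr
instance (arr : List (Int × Int)) (out : Int) : Decidable (Spec_max_chain_len arr out) := by unfold Spec_max_chain_len; infer_instance

-- ===== CLAIM (what is proved, stated in full; the proofs are below) =====
def Claim_equal_max_chain_len : Prop := ∀ (arr : List (Int × Int)), Dom_max_chain_len arr → Pre_max_chain_len arr → Spec_max_chain_len arr (max_chain_len arr)

-- ===== LEMMAS AND PROOFS =====

-- dp value A computes for element x, given the (element, dp-value) pairs before it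
def dpval (done : List ((Int × Int) × Int)) (x : Int × Int) : Int :=
  done.foldl (fun acc pd => if pd.1.2 < x.1 then max acc (1 + pd.2) else acc) 1

-- the (element, dp-value) table, extended over the remaining elements
def dpExtend (done : List ((Int × Int) × Int)) : List (Int × Int) → List ((Int × Int) × Int)
  | [] => done
  | x :: r => dpExtend (done ++ [(x, dpval done x)]) r

-- max of the dp values (0 for the empty table)
def maxd (done : List ((Int × Int) × Int)) : Int :=
  done.foldl (fun m pd => max m pd.2) 0

-- B's loop body
def gstep (st : Int × Option Int) (p : Int × Int) : Int × Option Int :=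
  match st.2 with
  | none => (st.1 + 1, some p.2)
  | some l => if l < p.1 then (st.1 + 1, some p.2) else st

lemma dpExtend_append (done : List ((Int × Int) × Int)) (l1 l2 : List (Int × Int)) :
    dpExtend done (l1 ++ l2) = dpExtend (dpExtend done l1) l2 := by
  induction l1 generalizing done with
  | nil => simp [dpExtend]
  | cons x r ih => simp [dpExtend, ih]

lemma mapfst_dpExtend (done : List ((Int × Int) × Int)) (l : List (Int × Int)) :
    (dpExtend done l).map Prod.fst = done.map Prod.fst ++ l := by
  induction l generalizing done with
  | nil => simp [dpExtend]
  | cons x r ih => simp [dpExtend, ih]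

lemma length_dpExtend (done : List ((Int × Int) × Int)) (l : List (Int × Int)) :
    (dpExtend done l).length = done.length + l.length := by
  have := congrArg List.length (mapfst_dpExtend done l)
  simpa using this

lemma dpval_acc_le (done : List ((Int × Int) × Int)) (x : Int × Int) (acc : Int) :
    acc ≤ done.foldl (fun acc pd => if pd.1.2 < x.1 then max acc (1 + pd.2) else acc) acc := by
  induction done generalizing acc with
  | nil => simp
  | cons pd r ih =>
    simp only [List.foldl_cons]
    split
    · exact le_trans (le_max_left _ _) (ih _)
    · exact ih _

lemma dpval_ge_aux (x : Int × Int) (pd : (Int × Int) × Int) (hc : pd.1.2 < x.1) :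
    ∀ (done : List ((Int × Int) × Int)) (acc : Int), pd ∈ done →
      1 + pd.2 ≤ done.foldl (fun acc pd => if pd.1.2 < x.1 then max acc (1 + pd.2) else acc) acc := by
  intro done
  induction done with
  | nil => intro acc hm; cases hm
  | cons q r ih =>
    intro acc hm
    rcases List.mem_cons.mp hm with h | h
    · subst h
      simp only [List.foldl_cons, if_pos hc]
      exact le_trans (le_max_right _ _) (dpval_acc_le r x _)
    · simp only [List.foldl_cons]
      split
      · exact ih _ h
      · exact ih _ h

lemma dpval_ge (done : List ((Int × Int) × Int)) (x : Int × Int) (pd : (Int × Int) × Int)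
    (hm : pd ∈ done) (hc : pd.1.2 < x.1) : 1 + pd.2 ≤ dpval done x :=
  dpval_ge_aux x pd hc done 1 hm

lemma dpval_le_aux (x : Int × Int) (B : Int) :
    ∀ (done : List ((Int × Int) × Int)) (acc : Int), acc ≤ B →
      (∀ pd ∈ done, pd.1.2 < x.1 → 1 + pd.2 ≤ B) →
      done.foldl (fun acc pd => if pd.1.2 < x.1 then max acc (1 + pd.2) else acc) acc ≤ B := by
  intro done
  induction done with
  | nil => intro acc h _; simpa using h
  | cons pd r ih =>
    intro acc haccB h2
    simp only [List.foldl_cons]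
    split
    · exact ih _ (max_le haccB (h2 pd (List.mem_cons_self) (by assumption)))
        (fun q hq hc => h2 q (List.mem_cons_of_mem _ hq) hc)
    · exact ih _ haccB (fun q hq hc => h2 q (List.mem_cons_of_mem _ hq) hc)

lemma dpval_le (done : List ((Int × Int) × Int)) (x : Int × Int) (B : Int)
    (h1 : 1 ≤ B) (h2 : ∀ pd ∈ done, pd.1.2 < x.1 → 1 + pd.2 ≤ B) : dpval done x ≤ B :=
  dpval_le_aux x B done 1 h1 h2

lemma dpval_pos (done : List ((Int × Int) × Int)) (x : Int × Int) : 1 ≤ dpval done x :=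
  dpval_acc_le done x 1

lemma maxd_ge (done : List ((Int × Int) × Int)) (pd : (Int × Int) × Int) (hm : pd ∈ done) :
    pd.2 ≤ maxd done :=
  (PySem.List.le_foldl_max_int done (fun pd => pd.2) 0).2 pd hm

lemma maxd_le_aux (B : Int) :
    ∀ (done : List ((Int × Int) × Int)) (acc : Int), acc ≤ B → (∀ pd ∈ done, pd.2 ≤ B) →
      done.foldl (fun m pd => max m pd.2) acc ≤ B := by
  intro done
  induction done with
  | nil => intro acc h _; simpa using h
  | cons pd r ih =>
    intro acc haccB h
    simp only [List.foldl_cons]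
    exact ih _ (max_le haccB (h pd (List.mem_cons_self)))
      (fun q hq => h q (List.mem_cons_of_mem _ hq))

lemma maxd_le (done : List ((Int × Int) × Int)) (B : Int) (h0 : 0 ≤ B)
    (h : ∀ pd ∈ done, pd.2 ≤ B) : maxd done ≤ B :=
  maxd_le_aux B done 0 h0 h

-- the main simultaneous invariant: the greedy count equals the max dp value
lemma main_inv : ∀ (rest : List (Int × Int)) (done : List ((Int × Int) × Int)) (c : Int) (last : Option Int),
    (∀ pd ∈ done, 1 ≤ pd.2 ∧ pd.2 ≤ c) →
    (match last with
     | none => done = [] ∧ c = 0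
     | some L => ∃ pd ∈ done, pd.1.2 = L ∧ pd.2 = c) →
    (∀ L, last = some L → ∀ pd ∈ done, pd.2 = c → L ≤ pd.1.2) →
    (∀ pd ∈ done, ∀ q ∈ rest, pd.1.2 ≤ q.2) →
    rest.Pairwise (fun p q => p.2 ≤ q.2) →
    (rest.foldl gstep (c, last)).1 = maxd (dpExtend done rest) := by
  intro rest
  induction rest with
  | nil =>
    intro done c last hd hw _h3 _hc _hp
    simp only [List.foldl_nil, dpExtend]
    match last, hw with
    | none, ⟨hdone, hc0⟩ => subst hdone; subst hc0; simp [maxd]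
    | some L, ⟨pd, hm, _hL, hdc⟩ =>
      have h1 : c ≤ maxd done := hdc ▸ maxd_ge done pd hm
      have h2 : maxd done ≤ c := maxd_le done c (le_trans (by omega) (hdc ▸ (hd pd hm).1)) (fun q hq => (hd q hq).2)
      omega
  | cons x r ih =>
    intro done c last hd hw h3 hcross hpair
    have hcr : ∀ pd ∈ done, ∀ q ∈ r, pd.1.2 ≤ q.2 :=
      fun pd hpd q hq => hcross pd hpd q (List.mem_cons_of_mem _ hq)
    have hxr : ∀ q ∈ r, x.2 ≤ q.2 := (List.pairwise_cons.mp hpair).1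
    have hpr : r.Pairwise (fun p q => p.2 ≤ q.2) := (List.pairwise_cons.mp hpair).2
    simp only [List.foldl_cons, dpExtend]
    set v := dpval done x with hv
    match last, hw with
    | none, ⟨hdone, hc0⟩ =>
      subst hdone; subst hc0
      have hv1 : v = 1 := by simp [hv, dpval]
      have hstep : gstep (0, none) x = (1, some x.2) := by simp [gstep]
      rw [hstep]
      apply ih
      · intro pd hpd
        rcases List.mem_singleton.mp hpd with h
        subst h; simp [hv1]
      · exact ⟨(x, v), List.mem_singleton.mpr rfl, rfl, hv1⟩
      · intro L hL pd hpd _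
        rcases List.mem_singleton.mp hpd with h
        subst h; cases hL; exact le_refl _
      · intro pd hpd q hq
        rcases List.mem_singleton.mp hpd with h
        subst h; exact hxr q hq
      · exact hpr
    | some L, ⟨pd0, hm0, hL0, hd0⟩ =>
      have hc1 : 1 ≤ c := hd0 ▸ (hd pd0 hm0).1
      by_cases htake : L < x.1
      · -- greedy takes x; v = c + 1
        have hvge : c + 1 ≤ v := by
          have := dpval_ge done x pd0 hm0 (by rw [hL0]; exact htake)
          omega
        have hvle : v ≤ c + 1 :=
          dpval_le done x (c + 1) (by omega)
            (fun q hq _ => by have := (hd q hq).2; omega)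
        have hveq : v = c + 1 := le_antisymm hvle hvge
        have hstep : gstep (c, some L) x = (c + 1, some x.2) := by simp [gstep, htake]
        rw [hstep]
        apply ih
        · intro pd hpd
          rcases List.mem_append.mp hpd with h | h
          · have := hd pd h; omega
          · rcases List.mem_singleton.mp h with h
            subst h; simp [hveq]; omega
        · exact ⟨(x, v), List.mem_append_right _ (List.mem_singleton.mpr rfl), rfl, hveq⟩
        · intro M hM pd hpd hpdc
          cases hM
          rcases List.mem_append.mp hpd with h | h
          · have := (hd pd h).2; omega
          · rcases List.mem_singleton.mp h with h
            subst h; exact le_refl _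
        · intro pd hpd q hq
          rcases List.mem_append.mp hpd with h | h
          · exact hcr pd h q hq
          · rcases List.mem_singleton.mp h with h
            subst h; exact hxr q hq
        · exact hpr
      · -- greedy skips x; v ≤ c
        have hvle : v ≤ c := by
          apply dpval_le done x c hc1
          intro q hq hqx
          have hqc := (hd q hq).2
          by_cases hqe : q.2 = c
          · have := h3 L rfl q hq hqe
            omega
          · omega
        have hstep : gstep (c, some L) x = (c, some L) := by simp [gstep, htake]
        rw [hstep]
        apply ih
        · intro pd hpd
          rcases List.mem_append.mp hpd with h | h
          · exact hd pd h
          · rcases List.mem_singleton.mp h with h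
            subst h; exact ⟨dpval_pos done x, hvle⟩
        · exact ⟨pd0, List.mem_append_left _ hm0, hL0, hd0⟩
        · intro M hM pd hpd hpdc
          cases hM
          rcases List.mem_append.mp hpd with h | h
          · exact h3 L rfl pd h hpdc
          · rcases List.mem_singleton.mp h with h
            subst h
            calc L = pd0.1.2 := hL0.symm
              _ ≤ x.2 := hcross pd0 hm0 x (List.mem_cons_self)
        · intro pd hpd q hq
          rcases List.mem_append.mp hpd with h | h
          · exact hcr pd h q hq
          · rcases List.mem_singleton.mp h with h
            subst h; exact hxr q hq
        · exact hpr

lemma dpExtend_prefix : ∀ (l : List (Int × Int)) (done : List ((Int × Int) × Int)),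
    ∃ s, dpExtend done l = done ++ s := by
  intro l
  induction l with
  | nil => intro done; exact ⟨[], by simp [dpExtend]⟩
  | cons x r ih =>
    intro done
    obtain ⟨s, hs⟩ := ih (done ++ [(x, dpval done x)])
    exact ⟨[(x, dpval done x)] ++ s, by simp [dpExtend, hs]⟩

-- A's outer-loop body, named for the proofs (definitionally the port's inner fold)
def Aouter (a : List (Int × Int)) (dp : List Int) (i : Int) : List Int :=
  (PySem.List.pyRange 0 i 1).foldl (fun dp j =>
    if (PySem.List.pyGetD a i ((0:Int),(0:Int))).1 > (PySem.List.pyGetD a j ((0:Int),(0:Int))).2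
    then PySem.List.pySetD dp i (max (PySem.List.pyGetD dp i 0) (1 + PySem.List.pyGetD dp j 0))
    else dp) dp

lemma inner_bridge (a : List (Int × Int)) (k : Nat) (dp : List Int) (hk : k < dp.length) :
    ∀ m : Nat, m ≤ k →
    (PySem.List.pyRange 0 (m : Int) 1).foldl (fun dp j =>
      if (PySem.List.pyGetD a (k : Int) ((0:Int),(0:Int))).1 > (PySem.List.pyGetD a j ((0:Int),(0:Int))).2
      then PySem.List.pySetD dp (k : Int) (max (PySem.List.pyGetD dp (k : Int) 0) (1 + PySem.List.pyGetD dp j 0))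
      else dp) dp
    = dp.set k ((PySem.List.pyRange 0 (m : Int) 1).foldl (fun acc j =>
        if (PySem.List.pyGetD a (k : Int) ((0:Int),(0:Int))).1 > (PySem.List.pyGetD a j ((0:Int),(0:Int))).2
        then max acc (1 + PySem.List.pyGetD dp j 0) else acc) (dp.getD k 0)) := by
  intro m
  induction m with
  | zero =>
    intro _
    simp only [Nat.cast_zero, PySem.List.pyRange_one_eq_nil (le_refl 0), List.foldl_nil]
    rw [List.getD_eq_getElem dp 0 hk, List.set_getElem_self]
  | succ m ih =>
    intro hm
    have hm' : m ≤ k := by omega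
    have hcast : ((m + 1 : Nat) : Int) = (m : Int) + 1 := by push_cast; ring
    rw [hcast, PySem.List.pyRange_one_succ_right (by positivity), List.foldl_append, List.foldl_append,
        ih hm']
    simp only [List.foldl_cons, List.foldl_nil]
    set Acc := (PySem.List.pyRange 0 (m:Int) 1).foldl (fun acc j =>
        if (PySem.List.pyGetD a (k : Int) ((0:Int),(0:Int))).1 > (PySem.List.pyGetD a j ((0:Int),(0:Int))).2
        then max acc (1 + PySem.List.pyGetD dp j 0) else acc) (dp.getD k 0) with hAcc
    split
    · rw [PySem.List.pySetD_natCast, PySem.List.pyGetD_natCast, PySem.List.pyGetD_natCast]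
      have hmk : m ≠ k := by omega
      have h1 : (dp.set k Acc).getD k 0 = Acc := by
        simp [List.getD, hk]
      have h2 : (dp.set k Acc).getD m 0 = dp.getD m 0 := by
        simp [List.getD, List.getElem?_set_ne (h := (by omega : k ≠ m))]
      rw [h1, h2, List.set_set]
      simp
    · rfl

lemma acc_bridge (a : List (Int × Int)) (dp : List Int) (L : List ((Int × Int) × Int)) (k : Nat)
    (hLk : k ≤ L.length)
    (hfst : ∀ j : Nat, j < k → PySem.List.pyGetD a (j : Int) ((0:Int),(0:Int)) = (L.getD j (((0:Int),(0:Int)),(0:Int))).1)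
    (hsnd : ∀ j : Nat, j < k → PySem.List.pyGetD dp (j : Int) 0 = (L.getD j (((0:Int),(0:Int)),(0:Int))).2) :
    ∀ m : Nat, m ≤ k → ∀ init : Int,
    (PySem.List.pyRange 0 (m : Int) 1).foldl (fun acc j =>
        if (PySem.List.pyGetD a (k : Int) ((0:Int),(0:Int))).1 > (PySem.List.pyGetD a j ((0:Int),(0:Int))).2
        then max acc (1 + PySem.List.pyGetD dp j 0) else acc) init
    = (L.take m).foldl (fun acc pd =>
        if pd.1.2 < (PySem.List.pyGetD a (k : Int) ((0:Int),(0:Int))).1 then max acc (1 + pd.2) else acc) init := by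
  intro m
  induction m with
  | zero =>
    intro _ init
    simp [PySem.List.pyRange_one_eq_nil (le_refl 0)]
  | succ m ih =>
    intro hm init
    have hm' : m ≤ k := by omega
    have hmL : m < L.length := by omega
    have hcast : ((m + 1 : Nat) : Int) = (m : Int) + 1 := by push_cast; ring
    have htake : L.take (m + 1) = L.take m ++ [L.getD m (((0:Int),(0:Int)),(0:Int))] := by
      rw [List.take_succ, List.getElem?_eq_getElem hmL, List.getD_eq_getElem L _ hmL]
      rfl
    rw [hcast, PySem.List.pyRange_one_succ_right (by positivity), htake,
        List.foldl_append, List.foldl_append, ih hm']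
    simp only [List.foldl_cons, List.foldl_nil]
    rw [hfst m (by omega), hsnd m (by omega)]

lemma outer_bridge (a : List (Int × Int)) : ∀ k : Nat, k + 1 ≤ a.length →
    (PySem.List.pyRange 1 ((k : Int) + 1) 1).foldl (Aouter a) (List.replicate a.length 1)
    = (dpExtend [] (a.take (k + 1))).map Prod.snd ++ List.replicate (a.length - (k + 1)) 1 := by
  intro k
  induction k with
  | zero =>
    intro h1
    have h0 : 0 < a.length := by omega
    simp only [Nat.cast_zero, zero_add]
    rw [PySem.List.pyRange_one_eq_nil (le_refl 1), List.foldl_nil]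
    have htake : a.take (0 + 1) = [a[0]] := by
      rw [List.take_succ, List.getElem?_eq_getElem h0]
      rfl
    rw [htake]
    obtain ⟨n, hn⟩ : ∃ n, a.length = n + 1 := ⟨a.length - 1, by omega⟩
    rw [hn]
    simp [dpExtend, dpval, List.replicate_succ]
  | succ k ih =>
    intro hk2
    have hk1 : k + 1 ≤ a.length := by omega
    set L := dpExtend [] (a.take (k + 1)) with hL
    have hLlen : L.length = k + 1 := by
      rw [hL, length_dpExtend]
      simp [List.length_take, Nat.min_eq_left hk1]
    have hLfst : L.map Prod.fst = a.take (k + 1) := by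
      rw [hL, mapfst_dpExtend]; rfl
    set ds := L.map Prod.snd with hds
    have hdslen : ds.length = k + 1 := by simp [hds, hLlen]
    set dpk := ds ++ List.replicate (a.length - (k + 1)) 1 with hdpk
    have hdpklen : dpk.length = a.length := by
      simp [hdpk, hdslen, List.length_replicate]; omega
    rw [show ((k + 1 : Nat) : Int) + 1 = ((k : Int) + 1) + 1 from by push_cast; ring]
    rw [PySem.List.pyRange_one_succ_right (by omega : (1:Int) ≤ (k:Int) + 1), List.foldl_append, ih hk1]
    simp only [List.foldl_cons, List.foldl_nil]
    -- the (k+2)-nd outer iteration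
    have hidx : ((k : Int) + 1) = ((k + 1 : Nat) : Int) := by push_cast; ring
    have hkdp : k + 1 < dpk.length := by omega
    have hA : Aouter a dpk ((k : Int) + 1) = dpk.set (k + 1)
        ((PySem.List.pyRange 0 ((k + 1 : Nat) : Int) 1).foldl (fun acc j =>
          if (PySem.List.pyGetD a ((k + 1 : Nat) : Int) ((0:Int),(0:Int))).1 > (PySem.List.pyGetD a j ((0:Int),(0:Int))).2
          then max acc (1 + PySem.List.pyGetD dpk j 0) else acc) (dpk.getD (k + 1) 0)) := by
      rw [hidx]
      exact inner_bridge a (k + 1) dpk hkdp (k + 1) (le_refl _)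
    rw [hA]
    have hinit : dpk.getD (k + 1) 0 = 1 := by
      have hlen : 0 < a.length - (k + 1) := by omega
      have h1 : dpk[k + 1]? = some 1 := by
        rw [hdpk, List.getElem?_append_right (by omega)]
        simp [hdslen, List.getElem?_replicate, hlen]
      show (dpk[k + 1]?).getD 0 = 1
      rw [h1]
      rfl
    have hacc := acc_bridge a dpk L (k + 1) (by omega)
      (by
        intro j hj
        have hjL : j < L.length := by omega
        have hLj : L[j]? = some (L[j]'hjL) := List.getElem?_eq_getElem hjL
        rw [PySem.List.pyGetD_natCast]
        have h2 : (L.map Prod.fst)[j]? = (a.take (k + 1))[j]? := by rw [hLfst]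
        rw [List.getElem?_map, hLj, List.getElem?_take_of_lt hj] at h2
        show (a[j]?).getD (0, 0) = ((L[j]?).getD (((0:Int),(0:Int)),(0:Int))).1
        rw [← h2, hLj]
        rfl)
      (by
        intro j hj
        have hjL : j < L.length := by omega
        have hjds : j < ds.length := by omega
        have hLj : L[j]? = some (L[j]'hjL) := List.getElem?_eq_getElem hjL
        rw [PySem.List.pyGetD_natCast]
        have h4 : dpk[j]? = some ((L[j]'hjL).2) := by
          rw [hdpk, List.getElem?_append_left hjds, hds, List.getElem?_map, hLj]
          rfl
        show (dpk[j]?).getD 0 = ((L[j]?).getD (((0:Int),(0:Int)),(0:Int))).2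
        rw [h4, hLj]
        rfl)
      (k + 1) (le_refl _)
    rw [hinit, hacc 1, show L.take (k + 1) = L from by rw [List.take_of_length_le (by omega)]]
    -- identify the accumulated value with dpval L a[k+1]
    have hka : k + 1 < a.length := by omega
    have hX : PySem.List.pyGetD a ((k + 1 : Nat) : Int) ((0:Int),(0:Int)) = a[k + 1]'hka := by
      rw [PySem.List.pyGetD_natCast, List.getD_eq_getElem a _ hka]
    have hv : (L.foldl (fun acc pd =>
        if pd.1.2 < (PySem.List.pyGetD a ((k + 1 : Nat) : Int) ((0:Int),(0:Int))).1 then max acc (1 + pd.2) else acc) 1)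
        = dpval L (a[k + 1]'hka) := by
      unfold dpval
      rw [hX]
    rw [hv]
    -- push the set through the append
    have hset : dpk.set (k + 1) (dpval L (a[k + 1]'hka))
        = (ds ++ [dpval L (a[k + 1]'hka)]) ++ List.replicate (a.length - (k + 2)) 1 := by
      rw [hdpk, List.set_append_right _ _ (by omega), hdslen]
      have : a.length - (k + 1) = (a.length - (k + 2)) + 1 := by omega
      rw [this, List.replicate_succ]
      simp
    rw [hset]
    -- identify with dpExtend over the longer prefix
    have htake2 : a.take (k + 2) = a.take (k + 1) ++ [a[k + 1]'hka] := by
      rw [show k + 2 = (k + 1) + 1 from rfl, List.take_succ, List.getElem?_eq_getElem hka]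
      rfl
    rw [htake2, dpExtend_append, ← hL]
    have : dpExtend L [a[k + 1]'hka] = L ++ [(a[k + 1]'hka, dpval L (a[k + 1]'hka))] := rfl
    rw [this]
    simp [hds]

-- ===== VERDICT (by name: the statement is the Claim_ definition above) =====
theorem max_chain_len_spec : Claim_equal_max_chain_len := by
  intro arr _dom hne
  unfold Spec_max_chain_len
  set a := PySem.List.sorted arr (fun p => p.2) with ha
  have halen : a.length = arr.length := PySem.List.length_sorted ..
  have h1 : 0 < arr.length := by
    cases arr with
    | nil => exact absurd rfl hne
    | cons y t => simp
  -- B's value via the main invariant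
  have hB : max_chain_len_alt arr = (a.foldl gstep ((0:Int), (none : Option Int))).1 := rfl
  have hpair : a.Pairwise (fun p q => p.2 ≤ q.2) := by
    have := PySem.List.sorted_pairwise (xs := arr) (key := fun p : Int × Int => p.2)
    simpa using this
  have hBval := main_inv a [] 0 none (by intro pd h; cases h) ⟨rfl, rfl⟩
    (by intro L hL; cases hL) (by intro pd h; cases h) hpair
  -- A's value via the loop bridges
  have hA : max_chain_len arr = (match PySem.List.max?
      ((PySem.List.pyRange 1 ((arr.length : Nat) : Int) 1).foldl (Aouter a) (List.replicate arr.length 1))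
      (fun x => x) with
    | some v => v
    | none => 0) := rfl
  have hob := outer_bridge a (arr.length - 1) (by rw [halen]; omega)
  have hcast : ((arr.length - 1 : Nat) : Int) + 1 = ((arr.length : Nat) : Int) := by omega
  rw [hcast] at hob
  have htk : a.take ((arr.length - 1) + 1) = a := by
    apply List.take_of_length_le
    rw [halen]
    omega
  have hrep0 : a.length - ((arr.length - 1) + 1) = 0 := by rw [halen]; omega
  rw [htk, hrep0] at hob
  simp only [List.replicate_zero, List.append_nil] at hob
  rw [halen] at hob
  rw [hA, hob, hB, hBval]
  -- both sides in terms of the dp table of the sorted list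
  have hane : a ≠ [] := by
    intro h
    rw [h] at halen
    simp at halen
    omega
  obtain ⟨x, r, hx⟩ := List.exists_cons_of_ne_nil hane
  have hD : dpExtend [] a = dpExtend [(x, 1)] r := by
    rw [hx]
    simp [dpExtend, dpval]
  obtain ⟨s, hs⟩ := dpExtend_prefix r [(x, 1)]
  have hDs : dpExtend [] a = (x, 1) :: s := by rw [hD, hs]; rfl
  rw [hDs]
  simp only [List.map_cons, PySem.List.max?_id_cons]
  unfold maxd
  simp only [List.foldl_cons, List.foldl_map]
  norm_num
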